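-- pv_equiv track=rewrite | github.com/mouredev/roadmap-retos-programacion | Roadmap/39 - BATMAN DAY/python/davidrguez98.py | sum_subgrid_alerts
-- ===== SOURCE A (Python) =====
-- def sum_subgrid_alerts(sensors, x, y) -> int:
--
--     total = 0
--
--     for x in range(x - 1, x + 2):
--         for y in range(y - 1, y + 2):
--             for sensor in sensors:
--                 if sensor[0] == x and sensor[1] == y:
--                     total += sensor[2]
--
--     return total
-- ===== SOURCE B (Python) =====
-- def sum_subgrid_alerts(sensors, x, y) -> int:
--     xs = {x - 1, x, x + 1}
--     ys = {y - 1, y, y + 1}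
--     return sum(s[2] for s in sensors if s[0] in xs and s[1] in ys)
-- ===== Notes on version B (the rewrite author's own statement) =====
-- stated objective: simpler
-- what changed: Replaces the 9-cells x n-sensors nested scan with a single pass over the sensors testing set membership of the coordinates, and fixes A's variable-shadowing bug that skews the scanned region.
-- intended difference: On inputs with a sensor at one of the skewed cells (x,y+2),(x+1,y+2),(x+1,y+3),(x,y-1),(x+1,y-1),(x+1,y) with unbalanced values, A sums a skewed region because the loop variable y is reused and mutated (e.g. A counts (x,y+2) but misses (x,y-1)); B sums the true 3x3 neighborhood around (x,y), which is the function's stated purpose. — e.g. on sum_subgrid_alerts([(0, 2, 5)], 0, 0): A returns 5, B returns 0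
import Mathlib
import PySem

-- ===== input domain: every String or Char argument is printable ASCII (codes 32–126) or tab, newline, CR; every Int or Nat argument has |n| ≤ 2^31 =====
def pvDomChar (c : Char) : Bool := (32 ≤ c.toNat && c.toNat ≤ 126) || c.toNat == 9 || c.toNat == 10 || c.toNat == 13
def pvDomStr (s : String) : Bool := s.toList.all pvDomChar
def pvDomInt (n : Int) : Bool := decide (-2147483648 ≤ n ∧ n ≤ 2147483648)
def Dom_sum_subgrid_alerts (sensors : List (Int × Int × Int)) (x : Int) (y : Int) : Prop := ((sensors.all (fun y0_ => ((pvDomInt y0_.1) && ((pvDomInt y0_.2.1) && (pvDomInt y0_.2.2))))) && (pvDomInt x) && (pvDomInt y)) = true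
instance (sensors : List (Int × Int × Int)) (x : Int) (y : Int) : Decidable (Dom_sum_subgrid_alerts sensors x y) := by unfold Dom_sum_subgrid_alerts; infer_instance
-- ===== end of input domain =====

-- B replaces A's 9-cells × n-sensors nested scan by a single pass over the sensors with
-- set-membership tests on the coordinates (objective: simpler), and returns the intended
-- 3×3-neighborhood sum where A's reuse of the loop variable `y` skews the scanned region.

-- ===== PORT A =====
-- Python A rebinds the parameters x and y as loop variables; the inner range() is
-- re-evaluated on each outer iteration from the CURRENT (mutated) y, so the fold state
-- carries (total, y) exactly as in Python.
def sum_subgrid_alerts (sensors : List (Int × Int × Int)) (x : Int) (y : Int) : Int :=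
  ((PySem.List.pyRange (x - 1) (x + 2) 1).foldl
    (fun (st : Int × Int) xv =>
      (PySem.List.pyRange (st.2 - 1) (st.2 + 2) 1).foldl
        (fun (st2 : Int × Int) yv =>
          (sensors.foldl
            (fun total sensor =>
              if sensor.1 == xv && sensor.2.1 == yv then total + sensor.2.2 else total)
            st2.1,
           yv))
        st)
    (0, y)).1

-- ===== PORT B =====
def sum_subgrid_alerts_alt (sensors : List (Int × Int × Int)) (x : Int) (y : Int) : Int :=
  let xs : PySem.Set Int := PySem.Set.ofList [x - 1, x, x + 1]
  let ys : PySem.Set Int := PySem.Set.ofList [y - 1, y, y + 1]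
  ((sensors.filter (fun s => xs.contains s.1 && ys.contains s.2.1)).map (fun s => s.2.2)).sum

-- ===== PRECONDITION & SPEC =====
-- total value of the sensors sitting exactly at cell (a, b)
def pvCellSum (sensors : List (Int × Int × Int)) (a : Int) (b : Int) : Int :=
  sensors.foldl (fun t s => if s.1 == a && s.2.1 == b then t + s.2.2 else t) 0

-- A reuses the mutated loop variable y, so it sums the skewed region
-- {(x-1,y-1..y+1),(x,y..y+2),(x+1,y+1..y+3)} instead of the 3×3 square around (x,y); A and B
-- differ exactly when the three cells only A scans and the three cells only B scans carry
-- different sensor-value totals, and B's 3×3-neighborhood sum is the function's stated purpose.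
def D_sum_subgrid_alerts (sensors : List (Int × Int × Int)) (x : Int) (y : Int) : Prop :=
  pvCellSum sensors x (y + 2) + pvCellSum sensors (x + 1) (y + 2) + pvCellSum sensors (x + 1) (y + 3)
    ≠ pvCellSum sensors x (y - 1) + pvCellSum sensors (x + 1) (y - 1) + pvCellSum sensors (x + 1) y
instance (sensors : List (Int × Int × Int)) (x : Int) (y : Int) : Decidable (D_sum_subgrid_alerts sensors x y) := by unfold D_sum_subgrid_alerts; infer_instance

def Spec_sum_subgrid_alerts (sensors : List (Int × Int × Int)) (x : Int) (y : Int) (out : Int) : Prop := ¬ D_sum_subgrid_alerts sensors x y → out = sum_subgrid_alerts_alt sensors x y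
instance (sensors : List (Int × Int × Int)) (x : Int) (y : Int) (out : Int) : Decidable (Spec_sum_subgrid_alerts sensors x y out) := by unfold Spec_sum_subgrid_alerts; infer_instance

def pvDiffWitness_sum_subgrid_alerts : (List (Int × Int × Int)) × Int × Int := ([(0, 2, 5)], 0, 0)
def pvDiffWitnessOut_sum_subgrid_alerts : Int × Int := (5, 0)

-- ===== CLAIM =====
def Claim_unchanged_sum_subgrid_alerts : Prop := ∀ (sensors : List (Int × Int × Int)) (x : Int) (y : Int), Dom_sum_subgrid_alerts sensors x y → Spec_sum_subgrid_alerts sensors x y (sum_subgrid_alerts sensors x y)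
def Claim_changed_sum_subgrid_alerts : Prop := Dom_sum_subgrid_alerts (pvDiffWitness_sum_subgrid_alerts.1) (pvDiffWitness_sum_subgrid_alerts.2.1) (pvDiffWitness_sum_subgrid_alerts.2.2) ∧ D_sum_subgrid_alerts (pvDiffWitness_sum_subgrid_alerts.1) (pvDiffWitness_sum_subgrid_alerts.2.1) (pvDiffWitness_sum_subgrid_alerts.2.2) ∧ sum_subgrid_alerts (pvDiffWitness_sum_subgrid_alerts.1) (pvDiffWitness_sum_subgrid_alerts.2.1) (pvDiffWitness_sum_subgrid_alerts.2.2) = pvDiffWitnessOut_sum_subgrid_alerts.1 ∧ sum_subgrid_alerts_alt (pvDiffWitness_sum_subgrid_alerts.1) (pvDiffWitness_sum_subgrid_alerts.2.1) (pvDiffWitness_sum_subgrid_alerts.2.2) = pvDiffWitnessOut_sum_subgrid_alerts.2 ∧ pvDiffWitnessOut_sum_subgrid_alerts.1 ≠ pvDiffWitnessOut_sum_subgrid_alerts.2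
def Claim_exact_sum_subgrid_alerts : Prop := ∀ (sensors : List (Int × Int × Int)) (x : Int) (y : Int), Dom_sum_subgrid_alerts sensors x y → D_sum_subgrid_alerts sensors x y → sum_subgrid_alerts sensors x y ≠ sum_subgrid_alerts_alt sensors x y

-- ===== LEMMAS AND PROOFS =====
lemma pyRange3 (a : Int) : PySem.List.pyRange (a - 1) (a + 2) 1 = [a - 1, a, a + 1] := by
  rw [PySem.List.pyRange_one_cons (by omega), PySem.List.pyRange_one_cons (by omega),
      PySem.List.pyRange_one_cons (by omega)]
  have h : PySem.List.pyRange (a - 1 + 1 + 1 + 1) (a + 2) = [] := by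
    rw [show a - 1 + 1 + 1 + 1 = a + 2 by ring]
    simp [PySem.List.pyRange]
  rw [h]
  norm_num

lemma scan_eq (sensors : List (Int × Int × Int)) (a b st : Int) :
    sensors.foldl (fun t s => if s.1 == a && s.2.1 == b then t + s.2.2 else t) st
      = st + pvCellSum sensors a b := by
  induction sensors generalizing st with
  | nil => simp [pvCellSum]
  | cons s ss ih =>
    simp only [pvCellSum, List.foldl_cons] at *
    rw [ih, ih (if s.1 == a && s.2.1 == b then 0 + s.2.2 else 0)]
    split <;> ring

lemma cellSum_cons (s : Int × Int × Int) (ss : List (Int × Int × Int)) (a b : Int) :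
    pvCellSum (s :: ss) a b
      = (if s.1 == a && s.2.1 == b then s.2.2 else 0) + pvCellSum ss a b := by
  conv_lhs => rw [pvCellSum, List.foldl_cons, scan_eq]
  split <;> ring

lemma A_eq (sensors : List (Int × Int × Int)) (x y : Int) :
    sum_subgrid_alerts sensors x y =
      pvCellSum sensors (x - 1) (y - 1) + pvCellSum sensors (x - 1) y + pvCellSum sensors (x - 1) (y + 1)
      + pvCellSum sensors x y + pvCellSum sensors x (y + 1) + pvCellSum sensors x (y + 2)
      + pvCellSum sensors (x + 1) (y + 1) + pvCellSum sensors (x + 1) (y + 2) + pvCellSum sensors (x + 1) (y + 3) := by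
  simp only [sum_subgrid_alerts, pyRange3, List.foldl_cons, List.foldl_nil, scan_eq]
  ring_nf

lemma row_eq (y v w : Int) : (if (v = y - 1 ∨ v = y ∨ v = y + 1) then w else 0)
    = (if v = y - 1 then w else 0) + (if v = y then w else 0) + (if v = y + 1 then w else 0) := by
  split_ifs <;> omega

lemma ind_eq (x y u v w : Int) :
    (if PySem.Set.contains (PySem.Set.ofList [x - 1, x, x + 1]) u
        && PySem.Set.contains (PySem.Set.ofList [y - 1, y, y + 1]) v then w else 0)
    = (if u == x - 1 && v == y - 1 then w else 0) + (if u == x - 1 && v == y then w else 0)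
      + (if u == x - 1 && v == y + 1 then w else 0)
      + (if u == x && v == y - 1 then w else 0) + (if u == x && v == y then w else 0)
      + (if u == x && v == y + 1 then w else 0)
      + (if u == x + 1 && v == y - 1 then w else 0) + (if u == x + 1 && v == y then w else 0)
      + (if u == x + 1 && v == y + 1 then w else 0) := by
  have hx : PySem.Set.contains (PySem.Set.ofList [x - 1, x, x + 1]) u = true ↔ (u = x - 1 ∨ u = x ∨ u = x + 1) := by
    simp [pysem]; tauto
  have hy : PySem.Set.contains (PySem.Set.ofList [y - 1, y, y + 1]) v = true ↔ (v = y - 1 ∨ v = y ∨ v = y + 1) := by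
    simp [pysem]; tauto
  have d1 : (x : Int) - 1 ≠ x := by omega
  have d2 : (x : Int) - 1 ≠ x + 1 := by omega
  have d3 : (x : Int) ≠ x - 1 := by omega
  have d4 : (x : Int) ≠ x + 1 := by omega
  have d5 : (x : Int) + 1 ≠ x - 1 := by omega
  have d6 : (x : Int) + 1 ≠ x := by omega
  simp only [Bool.and_eq_true, beq_iff_eq, hx, hy, ite_and]
  by_cases h1 : u = x - 1
  · have h2 : ¬ u = x := by omega
    have h3 : ¬ u = x + 1 := by omega
    simp [h1, d1, d2, row_eq]
  · by_cases h2 : u = x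
    · have h3 : ¬ u = x + 1 := by omega
      simp [h2, d3, d4, row_eq]
    · by_cases h3 : u = x + 1
      · simp [h3, d5, d6, row_eq]
      · simp [h1, h2, h3]

lemma B_eq (sensors : List (Int × Int × Int)) (x y : Int) :
    sum_subgrid_alerts_alt sensors x y =
      pvCellSum sensors (x - 1) (y - 1) + pvCellSum sensors (x - 1) y + pvCellSum sensors (x - 1) (y + 1)
      + pvCellSum sensors x (y - 1) + pvCellSum sensors x y + pvCellSum sensors x (y + 1)
      + pvCellSum sensors (x + 1) (y - 1) + pvCellSum sensors (x + 1) y + pvCellSum sensors (x + 1) (y + 1) := by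
  induction sensors with
  | nil => simp [sum_subgrid_alerts_alt, pvCellSum]
  | cons s ss ih =>
    simp only [sum_subgrid_alerts_alt, List.filter_cons] at ih ⊢
    simp only [cellSum_cons]
    have hind := ind_eq x y s.1 s.2.1 s.2.2
    by_cases hp : (PySem.Set.contains (PySem.Set.ofList [x - 1, x, x + 1]) s.1
        && PySem.Set.contains (PySem.Set.ofList [y - 1, y, y + 1]) s.2.1) = true
    · rw [if_pos hp] at hind
      simp only [hp, if_true, List.map_cons, List.sum_cons]
      rw [ih]
      linarith [hind]
    · rw [if_neg hp] at hind
      rw [Bool.not_eq_true] at hp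
      simp only [hp, Bool.false_eq_true, if_false]
      rw [ih]
      linarith [hind]

-- ===== VERDICT =====
theorem sum_subgrid_alerts_spec : Claim_unchanged_sum_subgrid_alerts := by
  intro sensors x y _ hND
  rw [A_eq, B_eq]
  unfold D_sum_subgrid_alerts at hND
  rw [not_ne_iff] at hND
  linarith
theorem sum_subgrid_alerts_changed : Claim_changed_sum_subgrid_alerts := by unfold Claim_changed_sum_subgrid_alerts; decide
theorem sum_subgrid_alerts_tight : Claim_exact_sum_subgrid_alerts := by
  intro sensors x y _ hD heq
  rw [A_eq, B_eq] at heq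
  unfold D_sum_subgrid_alerts at hD
  exact hD (by linarith)
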